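-- pv_equiv track=rewrite | github.com/mramagu/Fortran-to-Python-Wrapper | fparser/fparsertools.py | find_and
-- ===== SOURCE A (Python) =====
-- def find_and(code_line):
--     """
--         Function that finds the position of & command in a fortran line.
--
--         Args:
--             code_line (string): line of code
--
--         Returns:
--             None if it is not present or its position in the code line string
--     """
--     discard_between = ['\'', '\"']
--     counter = 0
--     while counter + 1 <= len(code_line): # Studies each position in the line
--         if code_line[counter] in discard_between: # If fortran character is being written jumps to end of char
--             jump = code_line[counter+1:].find(code_line[counter])
--             if jump == -1:
--                 raise Exception('Fortran character did not finish being declared from position {}: \n {}'.format(counter, code_line))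
--             counter += jump + 1
--         if '&' == code_line[counter]: # If selection matches it studies the code
--             return counter
--             break
--         if code_line[counter] == '!': # If writting fortran comment invalidate rest of the line and returns None
--             return None
--             break
--         counter += 1 # Adds 1 to the counter
--     else: # If it reaches the end of the code without finding command it returns None
--         return None
-- ===== SOURCE B (Python) =====
-- def find_and(code_line):
--     """State-machine re-implementation: single pass over characters with an
--     in-string flag instead of find()-jumps."""
--     in_string = False
--     quote_char = ''
--     open_idx = 0
--     for idx, ch in enumerate(code_line):
--         if in_string:
--             if ch == quote_char:
--                 in_string = False
--         elif ch in ('\'', '"'):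
--             in_string = True
--             quote_char = ch
--             open_idx = idx
--         elif ch == '&':
--             return idx
--         elif ch == '!':
--             return None
--     if in_string:
--         raise Exception('Fortran character did not finish being declared from position {}: \n {}'.format(open_idx, code_line))
--     return None
-- ===== Notes on version B (the rewrite author's own statement) =====
-- stated objective: idiomatic
-- what changed: Replaces A's while-loop that jumps over quoted regions via slicing and str.find by a single character-by-character state machine over enumerate(code_line) maintaining an in-string flag and the quote char.
import Mathlib
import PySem

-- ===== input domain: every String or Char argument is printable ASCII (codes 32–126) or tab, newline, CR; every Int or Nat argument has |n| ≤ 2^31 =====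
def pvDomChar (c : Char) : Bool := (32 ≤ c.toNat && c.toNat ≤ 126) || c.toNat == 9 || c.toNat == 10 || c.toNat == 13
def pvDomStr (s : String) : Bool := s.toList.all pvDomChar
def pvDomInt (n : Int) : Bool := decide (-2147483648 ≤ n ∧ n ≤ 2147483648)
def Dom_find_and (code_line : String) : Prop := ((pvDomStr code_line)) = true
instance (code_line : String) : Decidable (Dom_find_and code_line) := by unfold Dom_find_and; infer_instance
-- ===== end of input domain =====

-- B replaces A's find()-and-jump scan by an idiomatic single character-by-character
-- state machine with an in-string flag (same behaviour, including the exception).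

-- ===== PORT A =====
-- A's while loop: counter advances by 1, or jumps past a quoted region via find.
-- fuel only makes the recursion structural; it starts at length+1 and never runs out
-- (counter grows by ≥ 1 per step and the loop stops once counter ≥ length).
def find_and_loop (s : List Char) (counter : Nat) (fuel : Nat) : Option Int :=
  match fuel with
  | 0 => none
  | fuel + 1 =>
    if counter + 1 ≤ s.length then
      let c := s.getD counter ' '
      match (if c = '\'' ∨ c = '"' then
               -- jump = code_line[counter+1:].find(code_line[counter])
               match PySem.List.index? (s.drop (counter + 1)) c with
               | none => none            -- jump = -1: Python raises Exception (outside Pre_)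
               | some j => some (counter + j + 1)
             else some counter) with
      | none => none                     -- the raise; excluded by Pre_find_and
      | some counter =>
        if s.getD counter ' ' = '&' then some (counter : Int)
        else if s.getD counter ' ' = '!' then none
        else find_and_loop s (counter + 1) fuel
    else none

def find_and (code_line : String) : Option Int :=
  find_and_loop code_line.toList 0 (code_line.toList.length + 1)

-- ===== PORT B =====
-- state = none: outside a string; state = some (quote_char, open_idx): inside one.
def find_and_alt_loop (s : List Char) (idx : Nat) (state : Option (Char × Nat)) : Option Int :=
  match s with
  | [] => none              -- if still in_string here, Python B raises (outside Pre_)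
  | ch :: rest =>
    match state with
    | some (q, op) =>
      if ch = q then find_and_alt_loop rest (idx + 1) none
      else find_and_alt_loop rest (idx + 1) (some (q, op))
    | none =>
      if ch = '\'' ∨ ch = '"' then find_and_alt_loop rest (idx + 1) (some (ch, idx))
      else if ch = '&' then some (idx : Int)
      else if ch = '!' then none
      else find_and_alt_loop rest (idx + 1) none

def find_and_alt (code_line : String) : Option Int :=
  find_and_alt_loop code_line.toList 0 none

-- ===== PRECONDITION & SPEC =====
-- every quoted region that the scan reaches (before any unquoted '&' or '!') is closed;
-- exactly the inputs on which Python A returns instead of raising Exception.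
def quotesTerminated : List Char → Option Char → Bool
  | [], st => st.isNone
  | c :: rest, some q => quotesTerminated rest (if c = q then none else some q)
  | c :: rest, none =>
    if c = '\'' ∨ c = '\"' then quotesTerminated rest (some c)
    else if c = '&' ∨ c = '!' then true
    else quotesTerminated rest none

def Pre_find_and (code_line : String) : Prop := quotesTerminated code_line.toList none = true
instance (code_line : String) : Decidable (Pre_find_and code_line) := by unfold Pre_find_and; infer_instance

def pvWitness_find_and : String := "x = 'a&b' &"

def Spec_find_and (code_line : String) (out : Option Int) : Prop := out = find_and_alt code_line
instance (code_line : String) (out : Option Int) : Decidable (Spec_find_and code_line out) := by unfold Spec_find_and; infer_instance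

-- ===== CLAIM (what is proved, stated in full; the proofs are below) =====
def Claim_equal_find_and : Prop := ∀ (code_line : String), Dom_find_and code_line → Pre_find_and code_line → Spec_find_and code_line (find_and code_line)

-- ===== LEMMAS AND PROOFS =====

-- B's in-string scan skips to just past the first occurrence of the quote char.
theorem alt_loop_in_string (rest : List Char) (idx : Nat) (q : Char) (op : Nat) :
    find_and_alt_loop rest idx (some (q, op)) =
      match PySem.List.index? rest q with
      | none => none
      | some j => find_and_alt_loop (rest.drop (j + 1)) (idx + j + 1) none := by
  induction rest generalizing idx with
  | nil => simp [find_and_alt_loop, PySem.List.index?]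
  | cons c rest ih =>
    by_cases hc : c = q
    · subst hc
      rw [PySem.List.index?_cons_self]
      simp [find_and_alt_loop]
    · rw [PySem.List.index?_cons_of_ne rest hc]
      simp only [find_and_alt_loop, if_neg hc, ih]
      cases h : PySem.List.index? rest q with
      | none => simp
      | some j =>
        simp only [Option.map_some]
        have : idx + 1 + j + 1 = idx + (j + 1) + 1 := by omega
        simp [List.drop_succ_cons, this]

theorem index?_getElem? {s : List Char} {c : Char} {j : Nat}
    (h : PySem.List.index? s c = some j) : s[j]? = some c ∧ j < s.length := by
  obtain ⟨hk, hget, -⟩ := PySem.List.getElem_of_index?_eq_some h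
  exact ⟨by simpa [List.getElem?_eq_getElem hk] using hget, hk⟩

-- the in-string state of quotesTerminated skips to just past the closing quote
theorem quotesTerminated_in_string (rest : List Char) (q : Char) :
    quotesTerminated rest (some q) =
      match PySem.List.index? rest q with
      | none => false
      | some j => quotesTerminated (rest.drop (j + 1)) none := by
  induction rest with
  | nil => simp [quotesTerminated, PySem.List.index?]
  | cons c rest ih =>
    by_cases hc : c = q
    · subst hc
      rw [PySem.List.index?_cons_self]
      simp [quotesTerminated]
    · rw [PySem.List.index?_cons_of_ne rest hc]
      simp only [quotesTerminated, if_neg hc, ih]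
      cases h : PySem.List.index? rest q with
      | none => simp
      | some j => simp [List.drop_succ_cons]

-- main invariant: at a position outside any string, with all reachable quotes closed,
-- A's loop from counter equals B's machine on the suffix.
theorem loop_eq (fuel : Nat) : ∀ (s : List Char) (counter : Nat),
    s.length - counter < fuel →
    quotesTerminated (s.drop counter) none = true →
    find_and_loop s counter fuel = find_and_alt_loop (s.drop counter) counter none := by
  induction fuel with
  | zero => intro s counter h; omega
  | succ fuel ih =>
    intro s counter hfuel hq
    by_cases hcnt : counter + 1 ≤ s.length
    · have hlt : counter < s.length := by omega
      obtain ⟨c, hc⟩ : ∃ c, s[counter] = c := ⟨_, rfl⟩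
      have hdrop : s.drop counter = c :: s.drop (counter + 1) := by
        rw [List.drop_eq_getElem_cons hlt, hc]
      have hgetD : s.getD counter ' ' = c := by
        simp [List.getD, List.getElem?_eq_getElem hlt, hc]
      rw [hdrop] at hq ⊢
      by_cases hquote : c = '\'' ∨ c = '\"'
      · -- quoted region: A jumps, B walks through it; both land after the closing quote
        rw [quotesTerminated] at hq
        rw [if_pos hquote, quotesTerminated_in_string] at hq
        cases hidx : PySem.List.index? (s.drop (counter + 1)) c with
        | none => rw [hidx] at hq; simp at hq
        | some j =>
          rw [hidx] at hq
          simp only at hq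
          obtain ⟨hclose, hjlt⟩ := index?_getElem? hidx
          have hclose' : s[counter + 1 + j]? = some c := by
            simpa [List.getElem?_drop] using hclose
          have hjlen : counter + 1 + j < s.length := by
            have := List.length_drop (l := s) (i := counter + 1); omega
          have hgetD2 : s.getD (counter + j + 1) ' ' = c := by
            have h' : counter + j + 1 = counter + 1 + j := by omega
            simp [List.getD, h', hclose']
          have hnamp : ¬ (c = '&') := by rcases hquote with h | h <;> subst h <;> decide
          have hnexc : ¬ (c = '!') := by rcases hquote with h | h <;> subst h <;> decide
          -- A's side
          rw [find_and_loop]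
          simp only [if_pos hcnt, hgetD, if_pos hquote, hidx, if_neg hnamp, if_neg hnexc,
            hgetD2]
          -- B's side
          simp only [find_and_alt_loop, if_pos hquote]
          rw [alt_loop_in_string]
          simp only [hidx]
          have hdd : (s.drop (counter + 1)).drop (j + 1) = s.drop (counter + j + 2) := by
            rw [List.drop_drop]; congr 1; omega
          rw [hdd] at hq ⊢
          have harith : counter + 1 + j + 1 = counter + j + 2 := by omega
          rw [harith]
          exact ih s (counter + j + 2) (by omega) hq
      · rw [find_and_loop]
        simp only [if_pos hcnt, hgetD, if_neg hquote]
        simp only [find_and_alt_loop, if_neg hquote]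
        by_cases hamp : c = '&'
        · simp [hamp]
        · by_cases hexc : c = '!'
          · simp [hexc]
          · simp only [if_neg hamp, if_neg hexc]
            rw [quotesTerminated, if_neg hquote, if_neg (by tauto)] at hq
            exact ih s (counter + 1) (by omega) hq
    · rw [find_and_loop, if_neg hcnt]
      have : s.drop counter = [] := List.drop_eq_nil_of_le (by omega)
      rw [this, find_and_alt_loop]

-- ===== VERDICT (by name: the statement is the Claim_ definition above) =====
theorem find_and_spec : Claim_equal_find_and := by
  intro code_line _ hpre
  unfold Spec_find_and find_and find_and_alt
  have := loop_eq (code_line.toList.length + 1) code_line.toList 0 (by omega)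
    (by simpa using hpre)
  simpa using this
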